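-- pv_equiv track=rewrite | github.com/mozman/ezdxf | src/ezdxf/_acis/sat.py | parse_header_str
-- ===== SOURCE A (Python) =====
-- from typing import List, Any, Sequence, Iterator, Tuple, Union
--
-- def parse_header_str(s: str) -> Iterator[str]:
--     num = ""
--     collect = 0
--     token = ""
--     for c in s.rstrip():
--         if collect > 0:
--             token += c
--             collect -= 1
--             if collect == 0:
--                 yield token
--                 token = ""
--         elif c == "@":
--             continue
--         elif c in "0123456789":
--             num += c
--         elif c == " " and num:
--             collect = int(num)
--             num = ""
-- ===== SOURCE B (Python) =====
-- def parse_header_str(s):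
--     s = s.rstrip()
--     n = len(s)
--     num = ""
--     i = 0
--     while i < n:
--         c = s[i]
--         i += 1
--         if c.isdigit():
--             num += c
--         elif c == " " and num:
--             count = int(num)
--             num = ""
--             if count <= n - i:
--                 if count > 0:
--                     yield s[i:i + count]
--                 i += count
--             else:
--                 return
-- ===== Notes on version B (the rewrite author's own statement) =====
-- stated objective: idiomatic
-- what changed: Replaces the per-character countdown state machine (num/collect/token fields updated on every char) with an index scan that, once a count is read, takes the whole token as one slice of the remaining string.
import Mathlib
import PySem

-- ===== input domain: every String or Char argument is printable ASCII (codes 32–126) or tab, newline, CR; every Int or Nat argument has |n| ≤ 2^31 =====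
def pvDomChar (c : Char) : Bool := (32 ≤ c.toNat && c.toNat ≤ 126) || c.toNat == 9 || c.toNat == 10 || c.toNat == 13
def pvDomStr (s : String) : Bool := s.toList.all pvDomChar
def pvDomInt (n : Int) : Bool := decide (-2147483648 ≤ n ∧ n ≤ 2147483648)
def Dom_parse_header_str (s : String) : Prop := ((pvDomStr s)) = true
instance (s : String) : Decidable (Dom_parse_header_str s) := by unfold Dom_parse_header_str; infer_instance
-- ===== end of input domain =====

-- B replaces A's per-character countdown state machine with an index/slice scan; return value only (A is a generator, compared as its list of yields).

-- shared helper: numeric value of a digit string (what int(num) computes on A's/B's digit-only num)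
def digitsVal (num : List Char) : Nat :=
  num.foldl (fun a c => a * 10 + (c.toNat - 48)) 0

-- ===== PORT A =====
-- state: (num, collect, token, out)
def goA (st : List Char × Nat × List Char × List String) (c : Char) :
    List Char × Nat × List Char × List String :=
  let (num, collect, token, out) := st
  if 0 < collect then
    let token := token ++ [c]
    let collect := collect - 1
    if collect = 0 then (num, 0, [], out ++ [String.ofList token])
    else (num, collect, token, out)
  else if c = '@' then (num, 0, token, out)
  else if c.isDigit then (num ++ [c], 0, token, out)
  else if c = ' ' ∧ num ≠ [] then ([], digitsVal num, [], out)
  else (num, 0, token, out)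

def parse_header_str (s : String) : List String :=
  ((PySem.Str.rstrip s).toList.foldl goA ([], 0, [], [])).2.2.2

-- ===== PORT B =====
-- index scan over the remaining characters; a recognised count takes the token as one slice (take/drop)
def goB : List Char → List Char → List String
  | [], _ => []
  | c :: rest, num =>
    if c.isDigit then goB rest (num ++ [c])
    else if c = ' ' ∧ num ≠ [] then
      let count := digitsVal num
      if count ≤ rest.length then
        (if 0 < count then [String.ofList (rest.take count)] else []) ++ goB (rest.drop count) []
      else []
    else goB rest num
termination_by l _ => l.length
decreasing_by
  · simp
  · simp
  · simp

def parse_header_str_alt (s : String) : List String :=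
  goB (PySem.Str.rstrip s).toList []

-- ===== PRECONDITION & SPEC =====
def Spec_parse_header_str (s : String) (out : List String) : Prop := out = parse_header_str_alt s
instance (s : String) (out : List String) : Decidable (Spec_parse_header_str s out) := by unfold Spec_parse_header_str; infer_instance

-- ===== CLAIM (what is proved, stated in full; the proofs are below) =====
def Claim_equal_parse_header_str : Prop := ∀ (s : String), Dom_parse_header_str s → Spec_parse_header_str s (parse_header_str s)

-- ===== LEMMAS AND PROOFS =====

-- the collecting phase of A: with collect = k > 0 it consumes the next k chars into token
theorem foldA_collect (l : List Char) : ∀ (k : Nat) (t : List Char) (num : List Char)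
    (out : List String), 0 < k →
    List.foldl goA (num, k, t, out) l =
      if k ≤ l.length then
        List.foldl goA (num, 0, [], out ++ [String.ofList (t ++ l.take k)]) (l.drop k)
      else (num, k - l.length, t ++ l, out) := by
  induction l with
  | nil =>
    intro k t num out hk
    simp only [List.foldl_nil, List.length_nil]
    rw [if_neg (by omega)]
    simp
  | cons c rest ih =>
    intro k t num out hk
    rcases Nat.lt_or_ge 1 k with h1 | h1
    · have : ¬ (k - 1 = 0) := by omega
      simp only [List.foldl_cons, goA, if_pos hk, this, if_false]
      rw [ih (k - 1) (t ++ [c]) num out (by omega)]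
      by_cases hle : k ≤ (c :: rest).length
      · have hle' : k - 1 ≤ rest.length := by simp at hle; omega
        rw [if_pos hle', if_pos hle]
        have htk : (c :: rest).take k = c :: rest.take (k - 1) := by
          cases k with
          | zero => omega
          | succ k' => simp
        have hdk : (c :: rest).drop k = rest.drop (k - 1) := by
          cases k with
          | zero => omega
          | succ k' => simp
        rw [htk, hdk]
        simp
      · have hle' : ¬ (k - 1 ≤ rest.length) := by simp at hle ⊢; omega
        rw [if_neg hle', if_neg hle]
        simp
        omega
    · have hk1 : k = 1 := by omega
      subst hk1
      simp [List.foldl_cons, goA]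

-- main invariant: from a non-collecting state, A's fold yields exactly goB
theorem foldA_eq_goB : ∀ (n : Nat) (l : List Char) (num : List Char) (out : List String),
    l.length ≤ n →
    (List.foldl goA (num, 0, [], out) l).2.2.2 = out ++ goB l num := by
  intro n
  induction n with
  | zero =>
    intro l num out hl
    have : l = [] := List.eq_nil_of_length_eq_zero (by omega)
    subst this
    simp [goB]
  | succ n ih =>
    intro l num out hl
    cases l with
    | nil => simp [goB]
    | cons c rest =>
      have hrest : rest.length ≤ n := by simp at hl; omega
      by_cases hd : c.isDigit
      · have hat : ¬ (c = '@') := by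
          intro h; subst h; simp [Char.isDigit] at hd
        have hstep : List.foldl goA (num, 0, [], out) (c :: rest) =
            List.foldl goA (num ++ [c], 0, [], out) rest := by
          simp [List.foldl_cons, goA, hd, hat]
        rw [hstep, ih rest (num ++ [c]) out hrest, goB]
        rw [if_pos hd]
      · by_cases hsp : c = ' ' ∧ num ≠ []
        · have hat : ¬ (c = '@') := by
            intro h; rw [h] at hsp; exact absurd hsp.1 (by decide)
          have hstep : List.foldl goA (num, 0, [], out) (c :: rest) =
              List.foldl goA ([], digitsVal num, [], out) rest := by
            simp [List.foldl_cons, goA, hsp]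
          rw [hstep, goB, if_neg hd, if_pos hsp]
          rcases Nat.eq_zero_or_pos (digitsVal num) with h0 | hpos
          · rw [h0]
            rw [ih rest [] out hrest]
            simp
          · rw [foldA_collect rest (digitsVal num) [] [] out hpos]
            by_cases hle : digitsVal num ≤ rest.length
            · rw [if_pos hle, if_pos hle, List.nil_append]
              rw [ih (List.drop (digitsVal num) rest) []
                (out ++ [String.ofList (List.take (digitsVal num) rest)]) (by simp; omega)]
              simp [hpos]
            · rw [if_neg hle, if_neg hle]
              simp
        · -- junk char (including '@', non-digit punctuation, space with empty num): state unchanged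
          have hstep : List.foldl goA (num, 0, [], out) (c :: rest) =
              List.foldl goA (num, 0, [], out) rest := by
            by_cases hat : c = '@'
            · simp [List.foldl_cons, goA, hat]
            · simp [List.foldl_cons, goA, hat, hd, hsp]
          rw [hstep, ih rest num out hrest, goB]
          rw [if_neg hd, if_neg hsp]

-- ===== VERDICT (by name: the statement is the Claim_ definition above) =====
theorem parse_header_str_spec : Claim_equal_parse_header_str := by
  intro s _
  unfold Spec_parse_header_str parse_header_str parse_header_str_alt
  simpa using foldA_eq_goB (PySem.Str.rstrip s).toList.length (PySem.Str.rstrip s).toList [] []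
    (Nat.le_refl _)
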